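-- pv_equiv track=rewrite | github.com/rohit-thangam/Vehitrax | backend/services/ocr_service.py | _apply_positional_corrections
-- ===== SOURCE A (Python) =====
-- _OCR_CORRECTIONS = {
--     'O': '0',
--     'I': '1',
--     'L': '1',
--     'B': '8',
--     'S': '5',
--     'Z': '2',
--     'G': '6',
--     'Q': '0',
-- }
--
-- _OCR_CORRECTIONS_REV = {v: k for k, v in _OCR_CORRECTIONS.items()
--                          if k not in ('O', 'Q')}
--
-- def _apply_positional_corrections(text: str) -> str:
--     """
--     Position-aware substitutions for standard 10-char Indian plates.
--
--     Layout: LL DD LL DDDD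
--       L positions → 0,1,4,5
--       D positions → 2,3,6,7,8,9
--     """
--     if len(text) != 10:
--         return text
--
--     LETTER_POS = {0, 1, 4, 5}
--     DIGIT_POS  = {2, 3, 6, 7, 8, 9}
--
--     result = list(text)
--     for i, ch in enumerate(result):
--         if i in LETTER_POS and ch.isdigit():
--             result[i] = _OCR_CORRECTIONS_REV.get(ch, ch)
--         elif i in DIGIT_POS and ch.isalpha():
--             result[i] = _OCR_CORRECTIONS.get(ch, ch)
--     return ''.join(result)
-- ===== SOURCE B (Python) =====
-- _OCR_CORRECTIONS = {
--     'O': '0',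
--     'I': '1',
--     'L': '1',
--     'B': '8',
--     'S': '5',
--     'Z': '2',
--     'G': '6',
--     'Q': '0',
-- }
--
-- _OCR_CORRECTIONS_REV = {v: k for k, v in _OCR_CORRECTIONS.items()
--                          if k not in ('O', 'Q')}
--
--
-- def _letters(seg):
--     return ''.join(_OCR_CORRECTIONS_REV.get(c, c) if c.isdigit() else c for c in seg)
--
--
-- def _digits(seg):
--     return ''.join(_OCR_CORRECTIONS.get(c, c) if c.isalpha() else c for c in seg)
--
--
-- def _apply_positional_corrections(text: str) -> str:
--     if len(text) != 10:
--         return text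
--     return (_letters(text[0:2]) + _digits(text[2:4])
--             + _letters(text[4:6]) + _digits(text[6:10]))
-- ===== Notes on version B (the rewrite author's own statement) =====
-- stated objective: simpler
-- what changed: Replaces the indexed loop with position-set membership tests by slicing the plate into its four fixed LL/DD/LL/DDDD segments and mapping a letter-slot or digit-slot correction over each segment.
import Mathlib
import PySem

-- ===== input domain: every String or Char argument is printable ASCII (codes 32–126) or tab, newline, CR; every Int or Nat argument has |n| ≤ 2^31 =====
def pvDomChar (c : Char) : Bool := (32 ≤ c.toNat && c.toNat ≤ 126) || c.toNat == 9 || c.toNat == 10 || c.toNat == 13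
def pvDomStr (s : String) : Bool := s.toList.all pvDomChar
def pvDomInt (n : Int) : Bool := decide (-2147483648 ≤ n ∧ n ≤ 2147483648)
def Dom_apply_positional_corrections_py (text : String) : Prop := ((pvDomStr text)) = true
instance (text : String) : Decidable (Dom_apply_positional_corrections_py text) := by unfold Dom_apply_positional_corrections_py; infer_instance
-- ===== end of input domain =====

-- ===== PORT A =====
-- B changes only the decomposition: fixed LL/DD/LL/DDDD segment slices instead of an indexed loop with position sets.
-- shared module constants (_OCR_CORRECTIONS and the comprehension-built _OCR_CORRECTIONS_REV), used by both ports
def ocrCorrections : PySem.Dict Char Char :=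
  PySem.Dict.ofList [('O','0'),('I','1'),('L','1'),('B','8'),('S','5'),('Z','2'),('G','6'),('Q','0')]

def ocrCorrectionsRev : PySem.Dict Char Char :=
  (ocrCorrections.items.filter (fun kv => !(kv.1 == 'O' || kv.1 == 'Q'))).foldl
    (fun d kv => d.insert kv.2 kv.1) PySem.Dict.empty

def apply_positional_corrections_py (text : String) : String :=
  if PySem.Str.len text ≠ 10 then text
  else
    let letterPos : PySem.Set Int := PySem.Set.ofList [0, 1, 4, 5]
    let digitPos  : PySem.Set Int := PySem.Set.ofList [2, 3, 6, 7, 8, 9]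
    let result : List Char :=
      (PySem.List.enumerate text.toList).map (fun p =>
        if PySem.Set.contains letterPos p.1 && PySem.Chars.isdigit p.2 then
          ocrCorrectionsRev.getD p.2 p.2
        else if PySem.Set.contains digitPos p.1 && PySem.Chars.isalpha p.2 then
          ocrCorrections.getD p.2 p.2
        else p.2)
    String.ofList result

-- ===== PORT B =====
def lettersSeg (seg : List Char) : List Char :=
  seg.map (fun c => if PySem.Chars.isdigit c then ocrCorrectionsRev.getD c c else c)

def digitsSeg (seg : List Char) : List Char :=
  seg.map (fun c => if PySem.Chars.isalpha c then ocrCorrections.getD c c else c)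

def apply_positional_corrections_py_alt (text : String) : String :=
  if PySem.Str.len text ≠ 10 then text
  else
    let cs := text.toList
    String.ofList (lettersSeg (PySem.List.slice cs (some 0) (some 2))
      ++ digitsSeg (PySem.List.slice cs (some 2) (some 4))
      ++ lettersSeg (PySem.List.slice cs (some 4) (some 6))
      ++ digitsSeg (PySem.List.slice cs (some 6) (some 10)))

-- ===== PRECONDITION & SPEC =====
def Spec_apply_positional_corrections_py (text : String) (out : String) : Prop := out = apply_positional_corrections_py_alt text
instance (text : String) (out : String) : Decidable (Spec_apply_positional_corrections_py text out) := by unfold Spec_apply_positional_corrections_py; infer_instance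

-- ===== CLAIM (what is proved, stated in full; the proofs are below) =====
def Claim_equal_apply_positional_corrections_py : Prop := ∀ (text : String), Dom_apply_positional_corrections_py text → Spec_apply_positional_corrections_py text (apply_positional_corrections_py text)

-- ===== LEMMAS AND PROOFS =====
theorem ports_agree (cs : List Char) (h : cs.length = 10) :
    apply_positional_corrections_py (String.ofList cs) = apply_positional_corrections_py_alt (String.ofList cs) := by
  match cs, h with
  | [a, b, c, d, e, f, g, h0, i, j], _ =>
    simp [apply_positional_corrections_py, apply_positional_corrections_py_alt,
      lettersSeg, digitsSeg, PySem.Str.len, PySem.List.enumerate,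
      PySem.List.slice, PySem.Set.contains, String.toList_ofList]

theorem ports_agree_short (cs : List Char) (h : cs.length ≠ 10) :
    apply_positional_corrections_py (String.ofList cs) = apply_positional_corrections_py_alt (String.ofList cs) := by
  have hl : ¬((cs.length : Int) = 10) := by omega
  simp [apply_positional_corrections_py, apply_positional_corrections_py_alt, PySem.Str.len, hl]

-- ===== VERDICT (by name: the statement is the Claim_ definition above) =====
theorem apply_positional_corrections_py_spec : Claim_equal_apply_positional_corrections_py := by
  intro text _
  unfold Spec_apply_positional_corrections_py
  by_cases h : text.toList.length = 10
  · have := ports_agree text.toList h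
    rwa [String.ofList_toList] at this
  · have := ports_agree_short text.toList h
    rwa [String.ofList_toList] at this
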